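-- pv_equiv track=rewrite | github.com/zencd/android-debloater | web.py | convert_multi_line_description_to_one_line
-- ===== SOURCE A (Python) =====
-- def convert_multi_line_description_to_one_line(s: str):
--     lines = s.splitlines()
--     lines = map(str.strip, lines)
--     lines = filter(bool, lines)
--     res = ''
--     for line in lines:
--         if res:
--             res += ' ' if res[-1] == '.' else ' - '
--         res += line
--     return res
-- ===== SOURCE B (Python) =====
-- def convert_multi_line_description_to_one_line(s: str):
--     def glue(lines):
--         head, *tail = lines
--         if not tail:
--             return head
--         sep = ' ' if head[-1] == '.' else ' - '
--         return head + sep + glue(tail)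
--     lines = [t for t in (ln.strip() for ln in s.splitlines()) if t]
--     return glue(lines) if lines else ''
-- ===== Notes on version B (the rewrite author's own statement) =====
-- stated objective: alternative
-- what changed: B replaces A's iterative loop over a growing accumulator (whose last character res[-1] drives the separator) by a structural recursion over the cleaned line list that builds the result from the right, choosing each separator from the current head line itself.
import Mathlib
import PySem

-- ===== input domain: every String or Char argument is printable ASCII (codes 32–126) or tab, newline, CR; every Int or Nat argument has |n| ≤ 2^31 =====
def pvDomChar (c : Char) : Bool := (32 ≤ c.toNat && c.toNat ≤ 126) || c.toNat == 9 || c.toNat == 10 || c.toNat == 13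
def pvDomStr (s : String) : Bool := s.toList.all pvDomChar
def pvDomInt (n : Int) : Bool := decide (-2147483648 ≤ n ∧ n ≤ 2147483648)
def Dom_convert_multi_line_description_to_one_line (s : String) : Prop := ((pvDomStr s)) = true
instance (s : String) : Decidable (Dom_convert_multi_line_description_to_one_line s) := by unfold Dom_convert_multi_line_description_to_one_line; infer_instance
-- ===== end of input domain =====

-- B glues the cleaned lines by structural recursion, choosing each separator from the head line itself, instead of A's loop over a growing accumulator inspected via res[-1]; alternative decomposition, same cost.

-- ===== PORT A =====
-- splitlines / strip / truthiness filter, then the accumulating loop; res[-1] via pyGet? (-1)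
def convert_multi_line_description_to_one_line (s : String) : String :=
  let lines := ((PySem.Chars.splitlines s.toList).map PySem.Chars.strip).filter (fun l => !l.isEmpty)
  String.mk (lines.foldl (fun res line =>
    (if res ≠ [] then
        res ++ (if PySem.List.pyGet? res (-1) = some '.' then [' '] else [' ', '-', ' '])
      else res) ++ line) [])

-- ===== PORT B =====
-- recursive glue: head alone for a singleton, else head ++ sep(head) ++ glue(tail);
-- Python's glue is only called on a non-empty list (B guards), so the [] base case is unreachable
def pvGlue : List (List Char) → List Char
  | [] => []
  | [head] => head
  | head :: cur :: rest =>
      head ++ (if PySem.List.pyGet? head (-1) = some '.' then [' '] else [' ', '-', ' ']) ++ pvGlue (cur :: rest)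

def convert_multi_line_description_to_one_line_alt (s : String) : String :=
  let lines := ((PySem.Chars.splitlines s.toList).map PySem.Chars.strip).filter (fun l => !l.isEmpty)
  if lines ≠ [] then String.mk (pvGlue lines) else ""

-- ===== PRECONDITION & SPEC =====
def Spec_convert_multi_line_description_to_one_line (s : String) (out : String) : Prop := out = convert_multi_line_description_to_one_line_alt s
instance (s : String) (out : String) : Decidable (Spec_convert_multi_line_description_to_one_line s out) := by unfold Spec_convert_multi_line_description_to_one_line; infer_instance

-- ===== CLAIM (what is proved, stated in full; the proofs are below) =====
def Claim_equal_convert_multi_line_description_to_one_line : Prop := ∀ (s : String), Dom_convert_multi_line_description_to_one_line s → Spec_convert_multi_line_description_to_one_line s (convert_multi_line_description_to_one_line s)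

-- ===== LEMMAS AND PROOFS =====

-- proof-only helper: the part of pvGlue after the head line
def pvSepGlue : List Char → List (List Char) → List Char
  | _, [] => []
  | prev, cur :: rest =>
      (if PySem.List.pyGet? prev (-1) = some '.' then [' '] else [' ', '-', ' ']) ++ cur ++ pvSepGlue cur rest

lemma pv_glue_eq (head : List Char) (rest : List (List Char)) :
    pvGlue (head :: rest) = head ++ pvSepGlue head rest := by
  induction rest generalizing head with
  | nil => simp [pvGlue, pvSepGlue]
  | cons cur rest' ih => simp [pvGlue, pvSepGlue, ih cur]

lemma pv_pyGet_neg_one (l : List Char) (h : l ≠ []) :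
    PySem.List.pyGet? l (-1) = l.getLast? := by
  have hl : 1 ≤ l.length := List.length_pos_iff.mpr h
  simp [PySem.List.pyGet?, PySem.List.pyIdx?, hl, List.getLast?_eq_getElem?]

lemma pv_loop (rest : List (List Char)) (prev acc : List Char)
    (hacc : acc ≠ []) (hprev : prev ≠ [])
    (hlast : acc.getLast? = prev.getLast?)
    (hrest : ∀ l ∈ rest, l ≠ []) :
    rest.foldl (fun res line =>
      (if res ≠ [] then
          res ++ (if PySem.List.pyGet? res (-1) = some '.' then [' '] else [' ', '-', ' '])
        else res) ++ line) acc
      = acc ++ pvSepGlue prev rest := by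
  induction rest generalizing prev acc with
  | nil => simp [pvSepGlue]
  | cons cur rest' ih =>
    have hcur : cur ≠ [] := hrest cur (List.mem_cons_self ..)
    have hrest' : ∀ l ∈ rest', l ≠ [] := fun l hl => hrest l (List.mem_cons_of_mem _ hl)
    have hsep : PySem.List.pyGet? acc (-1) = PySem.List.pyGet? prev (-1) := by
      rw [pv_pyGet_neg_one acc hacc, pv_pyGet_neg_one prev hprev, hlast]
    simp only [List.foldl_cons, hsep, if_pos hacc]
    have hacc' : (acc ++ (if PySem.List.pyGet? prev (-1) = some '.' then [' '] else [' ', '-', ' '])) ++ cur ≠ [] := by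
      simp [hcur]
    have hlast' : ((acc ++ (if PySem.List.pyGet? prev (-1) = some '.' then [' '] else [' ', '-', ' '])) ++ cur).getLast? = cur.getLast? := by
      obtain ⟨x, hx⟩ : ∃ x, cur.getLast? = some x := by
        cases h : cur.getLast? with
        | none => exact absurd (List.getLast?_eq_none_iff.mp h) hcur
        | some x => exact ⟨x, rfl⟩
      simp [List.getLast?_append, hx]
    rw [ih cur _ hacc' hcur hlast' hrest']
    simp [pvSepGlue, List.append_assoc]

-- ===== VERDICT (by name: the statement is the Claim_ definition above) =====
theorem convert_multi_line_description_to_one_line_spec : Claim_equal_convert_multi_line_description_to_one_line := by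
  intro s _
  unfold Spec_convert_multi_line_description_to_one_line
  unfold convert_multi_line_description_to_one_line convert_multi_line_description_to_one_line_alt
  generalize hE : ((PySem.Chars.splitlines s.toList).map PySem.Chars.strip).filter (fun l => !l.isEmpty) = L
  have hL : ∀ l ∈ L, l ≠ [] := by
    intro l hl
    rw [← hE] at hl
    have := List.of_mem_filter hl
    simpa using this
  cases L with
  | nil => rfl
  | cons l0 rest =>
    have h0 : l0 ≠ [] := hL l0 (List.mem_cons_self ..)
    simp only [List.foldl_cons, if_neg (by simp : ¬ ([] : List Char) ≠ []), List.nil_append,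
      if_pos (by simp : (l0 :: rest) ≠ [])]
    rw [pv_loop rest l0 l0 h0 h0 rfl (fun l hl => hL l (List.mem_cons_of_mem _ hl)),
      pv_glue_eq]
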